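-- pv_equiv track=rewrite | github.com/alecrisan/Hangman | repository/Repository.py | printHangmanStyle
-- ===== SOURCE A (Python) =====
-- def printHangmanStyle(s):
--     #s = self.chooseSentence()
--     remember = list()
--     new = ""
--     new = new + s[0]
--     remember.append(s[0])
--     for character in range(1, len(s) - 1):
--         if s[character] in remember:
--             new = new + s[character]
--         elif (s[character] != ' ' and s[character + 1] == ' ') or (s[character - 1] == ' ' and s[character] != ' '):
--             new = new + s[character]
--             remember.append(s[character])
--         elif s[character] != ' ':
--             new = new + "_"
--         else:
--             new = new + " "
--         character += 1
--     new = new + s[len(s) - 1]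
--     return new
-- ===== SOURCE B (Python) =====
-- def printHangmanStyle(s):
--     n = len(s)
--
--     def boundary(i):
--         return s[i] != ' ' and (s[i + 1] == ' ' or s[i - 1] == ' ')
--
--     # first pass: earliest index at which each letter becomes known
--     known = {s[0]: 0}
--     for i in range(1, n - 1):
--         if boundary(i) and s[i] not in known:
--             known[s[i]] = i
--
--     # second pass: build the masked middle
--     mid = []
--     for i in range(1, n - 1):
--         c = s[i]
--         if boundary(i) or known.get(c, i) < i:
--             mid.append(c)
--         elif c == ' ':
--             mid.append(' ')
--         else:
--             mid.append('_')
--     return s[0] + ''.join(mid) + s[n - 1]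
-- ===== Notes on version B (the rewrite author's own statement) =====
-- stated objective: alternative
-- what changed: A grows a list of revealed letters while emitting output in one pass; B instead precomputes in a first pass the earliest position at which each letter is revealed (position 0 and first word-boundary occurrences) and then builds the output in a second pass by comparing that earliest position with the current one.
import Mathlib
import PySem

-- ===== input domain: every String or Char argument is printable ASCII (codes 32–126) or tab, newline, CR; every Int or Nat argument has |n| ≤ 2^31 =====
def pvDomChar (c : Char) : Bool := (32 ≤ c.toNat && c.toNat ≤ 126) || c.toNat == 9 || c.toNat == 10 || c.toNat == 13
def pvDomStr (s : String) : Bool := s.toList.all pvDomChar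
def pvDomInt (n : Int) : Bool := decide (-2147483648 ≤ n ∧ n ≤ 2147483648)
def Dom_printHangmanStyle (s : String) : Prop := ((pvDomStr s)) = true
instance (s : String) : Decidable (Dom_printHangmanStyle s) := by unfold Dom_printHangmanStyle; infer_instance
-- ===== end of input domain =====

-- B replaces A's incrementally grown `remember` list by a precomputed first-pass map from each
-- letter to the earliest index at which it becomes known, then builds the output in a second pass
-- (objective: alternative decomposition, same observable return value).

-- ===== PORT A =====
-- one loop iteration of A: state = (new, remember), both as List Char
def stepA (cs : List Char) (st : List Char × List Char) (i : Nat) : List Char × List Char :=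
  let c := cs.getD i ' '
  if c ∈ st.2 then (st.1 ++ [c], st.2)
  else if (c ≠ ' ' ∧ cs.getD (i + 1) ' ' = ' ') ∨ (cs.getD (i - 1) ' ' = ' ' ∧ c ≠ ' ') then
    (st.1 ++ [c], st.2 ++ [c])
  else if c ≠ ' ' then (st.1 ++ ['_'], st.2)
  else (st.1 ++ [' '], st.2)

-- indices 1 .. len-2 as in range(1, len(s)-1); Pre_ excludes the empty string, so every
-- getD access below is in range exactly as in the Python
def printHangmanStyle (s : String) : String :=
  let cs := s.toList
  let n := cs.length
  let st := (List.range' 1 (n - 2)).foldl (stepA cs) ([cs.getD 0 ' '], [cs.getD 0 ' '])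
  String.mk (st.1 ++ [cs.getD (n - 1) ' '])

-- ===== PORT B =====
def bBoundary (cs : List Char) (i : Nat) : Bool :=
  cs.getD i ' ' != ' ' && (cs.getD (i + 1) ' ' == ' ' || cs.getD (i - 1) ' ' == ' ')

-- first pass: record the earliest index at which each letter becomes known
def bIns (cs : List Char) (d : List (Char × Nat)) (i : Nat) : List (Char × Nat) :=
  if bBoundary cs i && (d.lookup (cs.getD i ' ')).isNone then d ++ [(cs.getD i ' ', i)] else d

def bKnown (cs : List Char) (n : Nat) : List (Char × Nat) :=
  (List.range' 1 (n - 2)).foldl (bIns cs) [(cs.getD 0 ' ', 0)]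

-- second pass: one output character per interior position
def bMid (cs : List Char) (known : List (Char × Nat)) (i : Nat) : Char :=
  let c := cs.getD i ' '
  if bBoundary cs i || decide (((known.lookup c).getD i) < i) then c
  else if c == ' ' then ' ' else '_'

def printHangmanStyle_alt (s : String) : String :=
  let cs := s.toList
  let n := cs.length
  String.mk ([cs.getD 0 ' '] ++ (List.range' 1 (n - 2)).map (bMid cs (bKnown cs n)) ++ [cs.getD (n - 1) ' '])

-- ===== PRECONDITION & SPEC =====
-- Pre_ excludes only the empty string, on which the Python A raises IndexError at s[0]
def Pre_printHangmanStyle (s : String) : Prop := s ≠ ""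
instance (s : String) : Decidable (Pre_printHangmanStyle s) := by unfold Pre_printHangmanStyle; infer_instance
def pvWitness_printHangmanStyle : String := "ab cd"

def Spec_printHangmanStyle (s : String) (out : String) : Prop := out = printHangmanStyle_alt s
instance (s : String) (out : String) : Decidable (Spec_printHangmanStyle s out) := by unfold Spec_printHangmanStyle; infer_instance

-- ===== CLAIM (what is proved, stated in full; the proofs are below) =====
def Claim_equal_printHangmanStyle : Prop := ∀ (s : String), Dom_printHangmanStyle s → Pre_printHangmanStyle s → Spec_printHangmanStyle s (printHangmanStyle s)

-- ===== LEMMAS AND PROOFS =====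

-- proof-side vocabulary: `bnd` = word-boundary position; `RecIdx cs c j` = position j records
-- letter c (j = 0 always records cs[0]; interior boundaries record their letter);
-- `Pk cs i c` = letter c is already known when position i is processed
def bnd (cs : List Char) (i : Nat) : Prop :=
  cs.getD i ' ' ≠ ' ' ∧ (cs.getD (i + 1) ' ' = ' ' ∨ cs.getD (i - 1) ' ' = ' ')

def RecIdx (cs : List Char) (c : Char) (j : Nat) : Prop :=
  (j = 0 ∧ cs.getD 0 ' ' = c) ∨ (1 ≤ j ∧ bnd cs j ∧ cs.getD j ' ' = c)

def Pk (cs : List Char) (i : Nat) (c : Char) : Prop := ∃ j, j < i ∧ RecIdx cs c j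

-- Bool mirror of RecIdx/Pk so that the reference output character is computable
def recB (cs : List Char) (c : Char) (j : Nat) : Bool :=
  (j == 0 && cs.getD 0 ' ' == c) || (decide (1 ≤ j) && bBoundary cs j && cs.getD j ' ' == c)

def pkB (cs : List Char) (i : Nat) (c : Char) : Bool := (List.range i).any (recB cs c)

-- the character both programs emit at interior position i
def outC (cs : List Char) (i : Nat) : Char :=
  if pkB cs i (cs.getD i ' ') || bBoundary cs i then cs.getD i ' '
  else if cs.getD i ' ' == ' ' then ' ' else '_'

lemma bBoundary_iff (cs : List Char) (i : Nat) : bBoundary cs i = true ↔ bnd cs i := by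
  simp [bBoundary, bnd]

lemma recB_iff (cs : List Char) (c : Char) (j : Nat) : recB cs c j = true ↔ RecIdx cs c j := by
  simp only [recB, RecIdx, Bool.or_eq_true, Bool.and_eq_true, beq_iff_eq, decide_eq_true_iff,
    bBoundary_iff]
  tauto

lemma pkB_iff (cs : List Char) (i : Nat) (c : Char) : pkB cs i c = true ↔ Pk cs i c := by
  simp only [pkB, Pk, List.any_eq_true, List.mem_range, recB_iff]

lemma Pk_succ (cs : List Char) (a : Nat) (c : Char) :
    Pk cs (a + 1) c ↔ Pk cs a c ∨ RecIdx cs c a := by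
  constructor
  · rintro ⟨j, hj, hr⟩
    rcases Nat.lt_succ_iff_lt_or_eq.mp hj with h | h
    · exact Or.inl ⟨j, h, hr⟩
    · subst h; exact Or.inr hr
  · rintro (⟨j, hj, hr⟩ | hr)
    · exact ⟨j, Nat.lt_succ_of_lt hj, hr⟩
    · exact ⟨a, Nat.lt_succ_self a, hr⟩

lemma recIdx_pos (cs : List Char) (c : Char) (a : Nat) (ha : 1 ≤ a) :
    RecIdx cs c a ↔ bnd cs a ∧ cs.getD a ' ' = c := by
  unfold RecIdx
  constructor
  · rintro (⟨h0, _⟩ | ⟨_, hb, hc⟩)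
    · omega
    · exact ⟨hb, hc⟩
  · rintro ⟨hb, hc⟩; exact Or.inr ⟨ha, hb, hc⟩

lemma acond_iff_bnd (cs : List Char) (a : Nat) :
    ((cs.getD a ' ' ≠ ' ' ∧ cs.getD (a + 1) ' ' = ' ') ∨
     (cs.getD (a - 1) ' ' = ' ' ∧ cs.getD a ' ' ≠ ' ')) ↔ bnd cs a := by
  unfold bnd; tauto

-- A's loop produces exactly `map (outC cs)` and maintains `remember` = the known letters
lemma foldA_spec (cs : List Char) (m : Nat) : ∀ (a : Nat), 1 ≤ a → ∀ (acc rem : List Char),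
    (∀ c, c ∈ rem ↔ Pk cs a c) →
    ((List.range' a m).foldl (stepA cs) (acc, rem)).1
      = acc ++ (List.range' a m).map (outC cs) := by
  induction m with
  | zero => intro a _ acc rem _; simp
  | succ m ih =>
    intro a ha acc rem hrem
    rw [List.range'_succ]
    simp only [List.foldl_cons, List.map_cons]
    have hout_rev : (Pk cs a (cs.getD a ' ') ∨ bnd cs a) → outC cs a = cs.getD a ' ' := by
      intro h
      unfold outC
      have hcond : (pkB cs a (cs.getD a ' ') || bBoundary cs a) = true := by
        rw [Bool.or_eq_true]
        rcases h with h | h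
        · exact Or.inl ((pkB_iff cs a _).mpr h)
        · exact Or.inr ((bBoundary_iff cs a).mpr h)
      rw [if_pos hcond]
    by_cases hc : cs.getD a ' ' ∈ rem
    · have hp : Pk cs a (cs.getD a ' ') := (hrem _).mp hc
      have hstep : stepA cs (acc, rem) a = (acc ++ [cs.getD a ' '], rem) := by
        unfold stepA; rw [if_pos hc]
      rw [hstep, ih (a + 1) (by omega) _ rem ?_]
      · rw [hout_rev (Or.inl hp)]; simp
      · intro c
        rw [Pk_succ, ← hrem]
        constructor
        · exact Or.inl
        · rintro (h | h)
          · exact h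
          · rw [recIdx_pos cs c a ha] at h
            rw [← h.2]; exact hc
    · by_cases hb : bnd cs a
      · have hcond := (acond_iff_bnd cs a).mpr hb
        have hstep : stepA cs (acc, rem) a
            = (acc ++ [cs.getD a ' '], rem ++ [cs.getD a ' ']) := by
          unfold stepA; rw [if_neg hc, if_pos hcond]
        rw [hstep, ih (a + 1) (by omega) _ _ ?_]
        · rw [hout_rev (Or.inr hb)]; simp
        · intro c
          rw [Pk_succ, ← hrem, recIdx_pos cs c a ha]
          simp only [List.mem_append, List.mem_singleton]
          constructor
          · rintro (h | h)
            · exact Or.inl h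
            · exact Or.inr ⟨hb, h.symm⟩
          · rintro (h | h)
            · exact Or.inl h
            · exact Or.inr h.2.symm
      · have hcond : ¬ ((cs.getD a ' ' ≠ ' ' ∧ cs.getD (a + 1) ' ' = ' ') ∨
            (cs.getD (a - 1) ' ' = ' ' ∧ cs.getD a ' ' ≠ ' ')) := by
          rw [acond_iff_bnd]; exact hb
        have hp : ¬ Pk cs a (cs.getD a ' ') := fun h => hc ((hrem _).mpr h)
        have hout : outC cs a = (if cs.getD a ' ' == ' ' then ' ' else '_') := by
          unfold outC
          have hcond2 : ¬ ((pkB cs a (cs.getD a ' ') || bBoundary cs a) = true) := by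
            simp only [Bool.or_eq_true, not_or]
            exact ⟨fun hx => hp ((pkB_iff _ _ _).mp hx), fun hx => hb ((bBoundary_iff _ _).mp hx)⟩
          rw [if_neg hcond2]
        have hrem' : ∀ c, c ∈ rem ↔ Pk cs (a + 1) c := by
          intro c
          rw [Pk_succ, ← hrem, recIdx_pos cs c a ha]
          constructor
          · exact Or.inl
          · rintro (h | h)
            · exact h
            · exact absurd h.1 hb
        by_cases hsp : cs.getD a ' ' = ' '
        · have hstep : stepA cs (acc, rem) a = (acc ++ [' '], rem) := by
            unfold stepA
            rw [if_neg hc, if_neg hcond, if_neg (by simpa using hsp)]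
          rw [hstep, ih (a + 1) (by omega) _ rem hrem', hout,
            if_pos (show (cs.getD a ' ' == ' ') = true by simp only [beq_iff_eq]; exact hsp)]
          simp
        · have hstep : stepA cs (acc, rem) a = (acc ++ ['_'], rem) := by
            unfold stepA
            rw [if_neg hc, if_neg hcond, if_pos hsp]
          rw [hstep, ih (a + 1) (by omega) _ rem hrem', hout,
            if_neg (show ¬ ((cs.getD a ' ' == ' ') = true) by simp only [beq_iff_eq]; exact hsp)]
          simp

-- invariant for B's first pass: the dict maps each letter to its EARLIEST recording index so far
def KInv (cs : List Char) (m : Nat) (d : List (Char × Nat)) : Prop :=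
  ∀ c, (∀ j, d.lookup c = some j →
          RecIdx cs c j ∧ j < 1 + m ∧ ∀ j', j' < 1 + m → RecIdx cs c j' → j ≤ j')
     ∧ (d.lookup c = none → ∀ j, j < 1 + m → ¬ RecIdx cs c j)

lemma lookup_single (c k : Char) (v : Nat) :
    List.lookup c [(k, v)] = if c = k then some v else none := by
  by_cases h : c = k
  · simp [List.lookup, h]
  · simp [List.lookup, beq_eq_false_iff_ne.mpr h, h]

lemma known_inv (cs : List Char) (m : Nat) :
    KInv cs m ((List.range' 1 m).foldl (bIns cs) [(cs.getD 0 ' ', 0)]) := by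
  induction m with
  | zero =>
    intro c
    simp only [List.range'_zero, List.foldl_nil, lookup_single]
    by_cases h : c = cs.getD 0 ' '
    · rw [if_pos h]
      constructor
      · intro j hj
        injection hj with hj
        subst hj
        exact ⟨Or.inl ⟨rfl, h.symm⟩, by omega, fun j' _ _ => Nat.zero_le _⟩
      · intro hn; cases hn
    · rw [if_neg h]
      constructor
      · intro j hj; cases hj
      · intro _ j hj hr
        interval_cases j
        rcases hr with ⟨_, h0⟩ | ⟨h1, _⟩
        · exact h h0.symm
        · omega
  | succ m ih =>
    rw [List.range'_concat, List.foldl_append, List.foldl_cons, List.foldl_nil]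
    set d := (List.range' 1 m).foldl (bIns cs) [(cs.getD 0 ' ', 0)] with hd
    have hlt : 1 + 1 * m = 1 + m := by omega
    rw [hlt]
    set ch := cs.getD (1 + m) ' ' with hch
    intro c
    unfold bIns
    by_cases hcase : (bBoundary cs (1 + m) && (d.lookup ch).isNone) = true
    · rw [if_pos hcase]
      simp only [Bool.and_eq_true, Option.isNone_iff_eq_none] at hcase
      obtain ⟨hbB, hnone⟩ := hcase
      have hbnd : bnd cs (1 + m) := (bBoundary_iff cs (1 + m)).mp hbB
      rw [List.lookup_append, lookup_single]
      by_cases hc : c = ch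
      · subst hc
        rw [hnone, if_pos rfl]
        simp only [Option.none_or]
        constructor
        · intro j hj
          injection hj with hj
          subst hj
          refine ⟨Or.inr ⟨by omega, hbnd, hch.symm⟩, by omega, ?_⟩
          intro j' hj' hr'
          by_cases h : j' < 1 + m
          · exact absurd hr' ((ih ch).2 hnone j' h)
          · omega
        · intro hcontra; cases hcontra
      · rw [if_neg hc]
        have hnew : cs.getD (1 + m) ' ' ≠ c := fun h => hc (h.symm)
        cases hdl : d.lookup c with
        | some j =>
          simp only [hdl, Option.some_or]
          constructor
          · intro j' hj'
            injection hj' with hj'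
            subst hj'
            obtain ⟨hr, hb2, hmin⟩ := (ih c).1 j hdl
            refine ⟨hr, by omega, ?_⟩
            intro j'' hj'' hr''
            by_cases h : j'' < 1 + m
            · exact hmin j'' h hr''
            · have hje : j'' = 1 + m := by omega
              subst hje
              rcases hr'' with ⟨h0, _⟩ | ⟨_, _, hcc⟩
              · omega
              · exact absurd hcc hnew
          · intro h; cases h
        | none =>
          simp only [hdl, Option.none_or]
          constructor
          · intro j hj; cases hj
          · intro _ j hj hr
            by_cases h : j < 1 + m
            · exact (ih c).2 hdl j h hr
            · have hje : j = 1 + m := by omega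
              subst hje
              rcases hr with ⟨h0, _⟩ | ⟨_, _, hcc⟩
              · omega
              · exact absurd hcc hnew
    · rw [if_neg hcase]
      simp only [Bool.and_eq_true, Option.isNone_iff_eq_none, not_and_or] at hcase
      have hnotnew : ∀ j, j = 1 + m → RecIdx cs c j → ∃ j', d.lookup c = some j' := by
        intro j hj hr
        subst hj
        rcases hr with ⟨h0, _⟩ | ⟨_, hb2, hcc⟩
        · omega
        · rcases hcase with hnb | hs
          · exact absurd ((bBoundary_iff cs (1 + m)).mpr hb2) hnb
          · rw [← hcc]
            cases hdl : d.lookup (cs.getD (1 + m) ' ') with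
            | some j' => exact ⟨j', rfl⟩
            | none => exact absurd hdl hs
      constructor
      · intro j hj
        obtain ⟨hr, hb2, hmin⟩ := (ih c).1 j hj
        refine ⟨hr, by omega, ?_⟩
        intro j' hj' hr'
        by_cases h : j' < 1 + m
        · exact hmin j' h hr'
        · have hj'' : j' = 1 + m := by omega
          obtain ⟨j0, hj0⟩ := hnotnew j' hj'' hr'
          rw [hj0] at hj
          injection hj with hj
          subst hj
          have := ((ih c).1 j0 hj0).2.1
          omega
      · intro hn j hj hr
        by_cases h : j < 1 + m
        · exact (ih c).2 hn j h hr
        · obtain ⟨j0, hj0⟩ := hnotnew j (by omega) hr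
          rw [hj0] at hn; cases hn

-- B's reveal test `earliest-known index < i` coincides with `letter already known at i`
lemma known_getD_lt (cs : List Char) (m i : Nat) (h1 : 1 ≤ i) (h2 : i < 1 + m) (c : Char) :
    ((((List.range' 1 m).foldl (bIns cs) [(cs.getD 0 ' ', 0)]).lookup c).getD i < i)
      ↔ Pk cs i c := by
  have hinv := known_inv cs m c
  cases hdl : ((List.range' 1 m).foldl (bIns cs) [(cs.getD 0 ' ', 0)]).lookup c with
  | some j =>
    obtain ⟨hr, _, hmin⟩ := hinv.1 j hdl
    simp only [Option.getD_some]
    constructor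
    · intro hji; exact ⟨j, hji, hr⟩
    · rintro ⟨j', hj', hr'⟩
      have := hmin j' (by omega) hr'
      omega
  | none =>
    simp only [Option.getD_none]
    constructor
    · omega
    · rintro ⟨j', hj', hr'⟩
      exact absurd hr' (hinv.2 hdl j' (by omega))
  
lemma mid_eq (cs : List Char) (n : Nat) :
    ∀ i ∈ List.range' 1 (n - 2), bMid cs (bKnown cs n) i = outC cs i := by
  intro i hi
  rw [List.mem_range'_1] at hi
  unfold bMid outC bKnown
  have hkey := known_getD_lt cs (n - 2) i hi.1 hi.2 (cs.getD i ' ')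
  by_cases hrev : bnd cs i ∨ Pk cs i (cs.getD i ' ')
  · have c1 : (bBoundary cs i ||
        decide ((((List.range' 1 (n - 2)).foldl (bIns cs) [(cs.getD 0 ' ', 0)]).lookup
          (cs.getD i ' ')).getD i < i)) = true := by
      simp only [Bool.or_eq_true, bBoundary_iff, decide_eq_true_iff, hkey]; tauto
    have c2 : (pkB cs i (cs.getD i ' ') || bBoundary cs i) = true := by
      simp only [Bool.or_eq_true, pkB_iff, bBoundary_iff]; tauto
    rw [if_pos c1, if_pos c2]
  · push_neg at hrev
    have c1 : ¬ ((bBoundary cs i ||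
        decide ((((List.range' 1 (n - 2)).foldl (bIns cs) [(cs.getD 0 ' ', 0)]).lookup
          (cs.getD i ' ')).getD i < i)) = true) := by
      simp only [Bool.or_eq_true, bBoundary_iff, decide_eq_true_iff, hkey, not_or]; tauto
    have c2 : ¬ ((pkB cs i (cs.getD i ' ') || bBoundary cs i) = true) := by
      simp only [Bool.or_eq_true, pkB_iff, bBoundary_iff, not_or]; tauto
    rw [if_neg c1, if_neg c2]

lemma main_eq (cs : List Char) :
    String.mk (((List.range' 1 (cs.length - 2)).foldl (stepA cs)
        ([cs.getD 0 ' '], [cs.getD 0 ' '])).1 ++ [cs.getD (cs.length - 1) ' '])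
      = String.mk ([cs.getD 0 ' ']
          ++ (List.range' 1 (cs.length - 2)).map (bMid cs (bKnown cs cs.length))
          ++ [cs.getD (cs.length - 1) ' ']) := by
  have hrem0 : ∀ c, c ∈ [cs.getD 0 ' '] ↔ Pk cs 1 c := by
    intro c
    simp only [List.mem_singleton, Pk]
    constructor
    · intro h; exact ⟨0, by omega, Or.inl ⟨rfl, h.symm⟩⟩
    · rintro ⟨j, hj, hr⟩
      interval_cases j
      rcases hr with ⟨_, h0⟩ | ⟨_, _⟩
      · exact h0.symm
      · omega
  rw [foldA_spec cs (cs.length - 2) 1 (by omega) [cs.getD 0 ' '] [cs.getD 0 ' '] hrem0]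
  rw [List.map_congr_left (mid_eq cs cs.length)]

-- ===== VERDICT (by name: the statement is the Claim_ definition above) =====
theorem printHangmanStyle_spec : Claim_equal_printHangmanStyle := by
  intro s _ _
  show printHangmanStyle s = printHangmanStyle_alt s
  exact main_eq s.toList
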